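-- pv_equiv track=rewrite | github.com/leobkmer/spp_dcj_experimental | scripts/data_utils.py | get_subtree_sizes
-- ===== SOURCE A (Python) =====
-- def get_subtree_sizes(root,pc_tree):
--     subtree_size = {}
--     stack = [root]
--     remain = [root]
--     while len(remain)>0:
--         curr = remain.pop()
--         for child in pc_tree[curr]:
--             stack.append(child)
--             if child in pc_tree:
--                 remain.append(child)
--     while len(stack) > 0:
--         curr = stack.pop()
--         if curr not in pc_tree:
--             subtree_size[curr]=1
--         else:
--             subtree_size[curr]=0
--             for child in pc_tree[curr]:
--                 assert(child in subtree_size)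
--                 subtree_size[curr]+=subtree_size[child]
--     return subtree_size
-- ===== SOURCE B (Python) =====
-- def get_subtree_sizes(root, pc_tree):
--     subtree_size = {}
--
--     def fill(node):
--         # node is an internal node: its subtree size is the sum over its children,
--         # where a child without an entry in pc_tree is a leaf of size 1
--         total = 0
--         for child in pc_tree[node]:
--             if child in pc_tree:
--                 total += fill(child)
--             else:
--                 subtree_size[child] = 1
--                 total += 1
--         subtree_size[node] = total
--         return total
--
--     fill(root)
--     return subtree_size
-- ===== Notes on version B (the rewrite author's own statement) =====
-- stated objective: simpler
-- what changed: Replaces A's two explicit-stack passes (an exploration loop building a processing order, then a stack-popping accumulation loop) by a single recursive post-order helper that computes each internal node's size directly from its children and stores every size in the dict as it goes.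
import Mathlib
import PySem

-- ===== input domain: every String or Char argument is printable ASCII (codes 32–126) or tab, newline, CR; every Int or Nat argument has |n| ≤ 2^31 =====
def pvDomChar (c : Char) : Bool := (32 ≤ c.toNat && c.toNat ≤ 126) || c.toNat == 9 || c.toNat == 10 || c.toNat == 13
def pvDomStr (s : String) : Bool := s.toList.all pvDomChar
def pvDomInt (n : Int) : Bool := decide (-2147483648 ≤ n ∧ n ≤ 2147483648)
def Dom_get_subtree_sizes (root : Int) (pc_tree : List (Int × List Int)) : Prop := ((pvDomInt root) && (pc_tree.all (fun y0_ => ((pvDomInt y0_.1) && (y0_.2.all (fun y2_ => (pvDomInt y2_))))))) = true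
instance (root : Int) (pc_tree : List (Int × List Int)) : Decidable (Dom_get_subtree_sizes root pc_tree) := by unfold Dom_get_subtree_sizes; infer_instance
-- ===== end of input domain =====

-- B replaces A's two explicit-stack passes by one recursive post-order helper (simpler
-- decomposition, same asymptotic cost; return value only, no argument is mutated).
-- Both functions return a Python dict; a dict value is its key→value map (insertion order
-- is not part of the compared value), so both ports render the returned dict with its
-- items listed in ascending key order.

-- ===== PORT A =====
-- literal renderings of the Python expressions `pc_tree[v]` / `v in pc_tree`
def pvMem (pc_tree : List (Int × List Int)) (v : Int) : Bool :=
  (PySem.Dict.mk pc_tree).contains v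

def pvCh (pc_tree : List (Int × List Int)) (v : Int) : List Int :=
  (PySem.Dict.mk pc_tree).getD v []

-- fuel bound for A's first while loop (number of `remain` pops it can need)
def pvWeight (pc_tree : List (Int × List Int)) : Nat → Int → Nat
  | 0, _ => 1
  | n+1, v => 1 + (((pvCh pc_tree v).filter (fun c => pvMem pc_tree c)).map (pvWeight pc_tree n)).sum

-- A's first while loop: state (remain, stack), `remain.pop()` then push all children on
-- stack and the internal ones on remain
def pvLoop1 (pc_tree : List (Int × List Int)) : Nat → List Int → List Int → List Int
  | 0, _, stack => stack
  | fuel+1, remain, stack =>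
    match PySem.List.pop? remain with
    | none => stack
    | some (curr, remain') =>
      let s := (pvCh pc_tree curr).foldl
        (fun (s : List Int × List Int) child =>
          (s.1 ++ [child], if pvMem pc_tree child then s.2 ++ [child] else s.2))
        (stack, remain')
      pvLoop1 pc_tree fuel s.2 s.1

-- A's second while loop: `stack.pop()`, leaves get 1, internal nodes accumulate their
-- children's stored sizes starting from 0
def pvLoop2 (pc_tree : List (Int × List Int)) :
    Nat → List Int → PySem.Dict Int Int → PySem.Dict Int Int
  | 0, _, d => d
  | fuel+1, stack, d =>
    match PySem.List.pop? stack with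
    | none => d
    | some (curr, stack') =>
      if pvMem pc_tree curr = false then
        pvLoop2 pc_tree fuel stack' (d.insert curr 1)
      else
        pvLoop2 pc_tree fuel stack'
          ((pvCh pc_tree curr).foldl
            (fun dd child => dd.insert curr (dd.getD curr 0 + dd.getD child 0))
            (d.insert curr 0))

def get_subtree_sizes (root : Int) (pc_tree : List (Int × List Int)) : List (Int × Int) :=
  let stack := pvLoop1 pc_tree (pvWeight pc_tree (pc_tree.length + 1) root) [root] [root]
  PySem.List.sorted (pvLoop2 pc_tree stack.length stack PySem.Dict.empty).items
    (fun p => p.1) false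

-- ===== PORT B =====
-- B's recursive helper `fill` (fuel = recursion-depth guard; pc_tree.length + 1 suffices
-- on every input Pre_ admits); argument is an internal node; returns (total, updated dict)
def pvFillB (pc_tree : List (Int × List Int)) :
    Nat → Int → PySem.Dict Int Int → Int × PySem.Dict Int Int
  | 0, _, d => (0, d)   -- fuel exhausted: unreachable on inputs Pre_ admits
  | n+1, v, d =>
    let r := (pvCh pc_tree v).foldl
      (fun (acc : Int × PySem.Dict Int Int) child =>
        if pvMem pc_tree child then
          let rc := pvFillB pc_tree n child acc.2
          (acc.1 + rc.1, rc.2)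
        else
          (acc.1 + 1, acc.2.insert child 1))
      (0, d)
    (r.1, r.2.insert v r.1)

def get_subtree_sizes_alt (root : Int) (pc_tree : List (Int × List Int)) : List (Int × Int) :=
  PySem.List.sorted (pvFillB pc_tree (pc_tree.length + 1) root PySem.Dict.empty).2.items
    (fun p => p.1) false

-- ===== PRECONDITION & SPEC =====
-- "no cycle is reachable from v": every parent→child descending chain of internal nodes
-- from v is shorter than the given bound (with bound = number of keys + 1 this is exactly
-- acyclicity of the part of the graph A explores)
def pvOkB (pc_tree : List (Int × List Int)) : Nat → Int → Bool
  | 0, _ => false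
  | n+1, v => ((pvCh pc_tree v).filter (fun c => pvMem pc_tree c)).all (pvOkB pc_tree n)

-- Pre_ excludes inputs where root is not a key (both Pythons raise KeyError there at
-- `pc_tree[root]`), association lists with a repeated key (not representable by the Python
-- dict argument), and inputs whose parent→child edges reach a cycle from root, on which
-- A's first while loop never terminates; on every input on which A returns, Pre_ holds.
def Pre_get_subtree_sizes (root : Int) (pc_tree : List (Int × List Int)) : Prop :=
  pvMem pc_tree root = true ∧ (pc_tree.map Prod.fst).Nodup ∧
  pvOkB pc_tree (pc_tree.length + 1) root = true

instance (root : Int) (pc_tree : List (Int × List Int)) :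
    Decidable (Pre_get_subtree_sizes root pc_tree) := by
  unfold Pre_get_subtree_sizes; infer_instance

def pvWitness_get_subtree_sizes : Int × (List (Int × List Int)) :=
  (0, [(0, [1, 2]), (2, [3])])

def Spec_get_subtree_sizes (root : Int) (pc_tree : List (Int × List Int)) (out : List (Int × Int)) : Prop := out = get_subtree_sizes_alt root pc_tree
instance (root : Int) (pc_tree : List (Int × List Int)) (out : List (Int × Int)) : Decidable (Spec_get_subtree_sizes root pc_tree out) := by unfold Spec_get_subtree_sizes; infer_instance

-- ===== CLAIM (what is proved, stated in full; the proofs are below) =====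
def Claim_equal_get_subtree_sizes : Prop := ∀ (root : Int) (pc_tree : List (Int × List Int)), Dom_get_subtree_sizes root pc_tree → Pre_get_subtree_sizes root pc_tree → Spec_get_subtree_sizes root pc_tree (get_subtree_sizes root pc_tree)

-- ===== LEMMAS AND PROOFS =====

-- the exploration order A's first loop produces on the stack, as a recursion (proof device)
def pvVisit (pc_tree : List (Int × List Int)) : Nat → Int → List Int
  | 0, _ => []
  | n+1, v => pvCh pc_tree v ++
      ((((pvCh pc_tree v).filter (fun c => pvMem pc_tree c)).reverse.map
          (pvVisit pc_tree n)).flatten)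

-- one iteration of A's second loop
def pvStep (pc_tree : List (Int × List Int)) (d : PySem.Dict Int Int) (curr : Int) :
    PySem.Dict Int Int :=
  if pvMem pc_tree curr = false then d.insert curr 1
  else (pvCh pc_tree curr).foldl
    (fun dd child => dd.insert curr (dd.getD curr 0 + dd.getD child 0)) (d.insert curr 0)

-- `sum of the stored sizes of v's children`
def pvSumChD (pc_tree : List (Int × List Int)) (d : PySem.Dict Int Int) (v : Int) : Int :=
  (pvCh pc_tree v).foldl (fun a c => a + d.getD c 0) 0

-- A's second loop restated as a structural recursion over the tree (proof device)
def pvFill (pc_tree : List (Int × List Int)) :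
    Nat → Int → PySem.Dict Int Int → PySem.Dict Int Int
  | 0, _, d => d
  | n+1, v, d =>
    let cs := pvCh pc_tree v
    let d1 := cs.foldl (fun dd c => if pvMem pc_tree c then pvFill pc_tree n c dd else dd) d
    cs.reverse.foldl
      (fun dd c =>
        if pvMem pc_tree c then dd.insert c (pvSumChD pc_tree dd c)
        else dd.insert c 1) d1

-- the leaf-count of v's subtree, as a pure function (proof device)
def pvSz (pc_tree : List (Int × List Int)) : Nat → Int → Int
  | 0, _ => 1
  | n+1, v => if pvMem pc_tree v then ((pvCh pc_tree v).map (pvSz pc_tree n)).sum else 1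

-- the proper descendants of v (as visited by A), and all nodes of v's subtree (as by B)
def pvSub (pc_tree : List (Int × List Int)) : Nat → Int → List Int
  | 0, _ => []
  | n+1, v => (pvCh pc_tree v).flatMap
      (fun c => (if pvMem pc_tree c then pvSub pc_tree n c else []) ++ [c])


-- "the stored values are the true subtree sizes" (the invariant both builders preserve)
def pvCorrect (pc_tree : List (Int × List Int)) (d : PySem.Dict Int Int) : Prop :=
  ∀ x y, d.get? x = some y → y = pvSz pc_tree (pc_tree.length + 1) x

lemma pvSz_leaf (pc_tree : List (Int × List Int)) (v : Int)
    (h : pvMem pc_tree v = false) : ∀ n, pvSz pc_tree n v = 1 := by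
  intro n; cases n with
  | zero => rfl
  | succ n => simp [pvSz, h]

lemma pvOkB_not_self (pc_tree : List (Int × List Int)) :
    ∀ (n : Nat) (v : Int), pvOkB pc_tree n v = true → pvMem pc_tree v = true →
      v ∉ pvCh pc_tree v := by
  intro n
  induction n with
  | zero => intro v h; simp [pvOkB] at h
  | succ n ih =>
    intro v h hm hvv
    rw [pvOkB, List.all_eq_true] at h
    exact ih v (h v (List.mem_filter.mpr ⟨hvv, hm⟩)) hm hvv

lemma pvSz_stable (pc_tree : List (Int × List Int)) :
    ∀ (n : Nat) (v : Int) (m : Nat), pvOkB pc_tree n v = true → n ≤ m →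
      pvSz pc_tree m v = pvSz pc_tree n v := by
  intro n
  induction n with
  | zero => intro v m h; simp [pvOkB] at h
  | succ n ih =>
    intro v m h hnm
    rw [pvOkB, List.all_eq_true] at h
    obtain ⟨m', rfl⟩ : ∃ m', m = m' + 1 := ⟨m - 1, by omega⟩
    by_cases hv : pvMem pc_tree v = true
    · simp only [pvSz, hv, if_true]
      congr 1
      apply List.map_congr_left
      intro c hc
      by_cases hcm : pvMem pc_tree c = true
      · have hok := h c (List.mem_filter.mpr ⟨hc, hcm⟩)
        rw [ih c m' hok (by omega), ih c n hok (le_refl n)]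
      · rw [pvSz_leaf pc_tree c (by simpa using hcm), pvSz_leaf pc_tree c (by simpa using hcm)]
    · rw [pvSz_leaf pc_tree v (by simpa using hv), pvSz_leaf pc_tree v (by simpa using hv)]

lemma pvFoldl_add_sum (f : Int → Int) :
    ∀ (l : List Int) (a : Int), l.foldl (fun s c => s + f c) a = a + (l.map f).sum := by
  intro l
  induction l with
  | nil => intro a; simp
  | cons c l ih => intro a; simp [ih, add_assoc]

lemma pvSumChD_eq (pc_tree : List (Int × List Int)) (d : PySem.Dict Int Int) (v : Int)
    (hcor : pvCorrect pc_tree d)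
    (hpres : ∀ u ∈ pvCh pc_tree v, d.contains u = true) :
    pvSumChD pc_tree d v =
      ((pvCh pc_tree v).map (pvSz pc_tree (pc_tree.length + 1))).sum := by
  unfold pvSumChD
  rw [pvFoldl_add_sum, zero_add]
  congr 1
  apply List.map_congr_left
  intro u hu
  have hc := hpres u hu
  rw [PySem.Dict.contains_eq_isSome_get?] at hc
  obtain ⟨y, hy⟩ := Option.isSome_iff_exists.mp hc
  rw [PySem.Dict.getD_of_get?_eq_some _ _ hy, hcor u y hy]

lemma pvSz_internal (pc_tree : List (Int × List Int)) (n : Nat) (v : Int)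
    (hm : pvMem pc_tree v = true) (hok : pvOkB pc_tree n v = true)
    (hn : n ≤ pc_tree.length + 1) :
    pvSz pc_tree (pc_tree.length + 1) v =
      ((pvCh pc_tree v).map (pvSz pc_tree (pc_tree.length + 1))).sum := by
  obtain ⟨k, rfl⟩ : ∃ k, n = k + 1 := by
    cases n with
    | zero => simp [pvOkB] at hok
    | succ k => exact ⟨k, rfl⟩
  rw [pvOkB, List.all_eq_true] at hok
  have h1 : pvSz pc_tree (pc_tree.length + 1) v =
      ((pvCh pc_tree v).map (pvSz pc_tree pc_tree.length)).sum := by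
    conv_lhs => rw [pvSz]
    simp [hm]
  rw [h1]
  congr 1
  apply List.map_congr_left
  intro u hu
  by_cases hum : pvMem pc_tree u = true
  · have hoku := hok u (List.mem_filter.mpr ⟨hu, hum⟩)
    rw [pvSz_stable pc_tree k u pc_tree.length hoku (by omega),
        pvSz_stable pc_tree k u (pc_tree.length + 1) hoku (by omega)]
  · rw [pvSz_leaf pc_tree u (by simpa using hum), pvSz_leaf pc_tree u (by simpa using hum)]



lemma pvInsert_correct (pc_tree : List (Int × List Int)) (d : PySem.Dict Int Int) (v : Int)
    (hcor : pvCorrect pc_tree d) :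
    pvCorrect pc_tree (d.insert v (pvSz pc_tree (pc_tree.length + 1) v)) := by
  intro x y hxy
  rw [PySem.Dict.get?_insert] at hxy
  split_ifs at hxy with hx
  · subst hx; exact (Option.some_inj.mp hxy).symm
  · exact hcor x y hxy


lemma pvWeight_pos (pc_tree : List (Int × List Int)) (n : Nat) (v : Int) :
    1 ≤ pvWeight pc_tree n v := by
  cases n <;> simp [pvWeight]

lemma pvLoop1_spec (pc_tree : List (Int × List Int)) :
    ∀ (fuel : Nat) (L : List (Nat × Int)) (st : List Int),
      (∀ p ∈ L, pvOkB pc_tree p.1 p.2 = true ∧ pvMem pc_tree p.2 = true) →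
      (L.map (fun p => pvWeight pc_tree p.1 p.2)).sum ≤ fuel →
      pvLoop1 pc_tree fuel (L.map Prod.snd) st =
        st ++ (L.reverse.map (fun p => pvVisit pc_tree p.1 p.2)).flatten := by
  intro fuel
  induction fuel with
  | zero =>
    intro L st hconds hsum
    cases L with
    | nil => simp [pvLoop1]
    | cons p L' =>
      exfalso
      have := pvWeight_pos pc_tree p.1 p.2
      simp only [List.map_cons, List.sum_cons] at hsum
      omega
  | succ fuel ih =>
    intro L st hconds hsum
    rcases List.eq_nil_or_concat L with rfl | ⟨L', q, rfl⟩
    · simp [pvLoop1, show PySem.List.pop? ([] : List Int) = none from rfl]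
    · rw [List.concat_eq_append] at hconds hsum ⊢
      obtain ⟨n, v⟩ := q
      obtain ⟨hok, hmem⟩ := hconds (n, v) (by simp)
      cases n with
      | zero => exact absurd hok (by simp [pvOkB])
      | succ n' =>
      rw [pvOkB, List.all_eq_true] at hok
      rw [List.map_append]
      simp only [List.map_cons, List.map_nil]
      simp only [pvLoop1, PySem.List.pop?_last]
      rw [PySem.List.foldl_prod_mk (f := fun acc child => acc ++ [child])
        (g := fun acc child => if pvMem pc_tree child then acc ++ [child] else acc)]
      rw [PySem.List.foldl_append_singleton_eq_self, PySem.List.foldl_append_if_eq_filter]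
      set cs := pvCh pc_tree v with hcs
      set ics := cs.filter (fun c => pvMem pc_tree c) with hics
      have hconds2 : ∀ p ∈ L' ++ ics.map (fun c => (n', c)),
          pvOkB pc_tree p.1 p.2 = true ∧ pvMem pc_tree p.2 = true := by
        intro p hp
        rcases List.mem_append.mp hp with hp | hp
        · exact hconds p (List.mem_append.mpr (Or.inl hp))
        · obtain ⟨c, hc, rfl⟩ := List.mem_map.mp hp
          obtain ⟨hcv, hcm⟩ := List.mem_filter.mp hc
          exact ⟨hok c hc, hcm⟩
      have hsum2 : ((L' ++ ics.map (fun c => (n', c))).map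
          (fun p => pvWeight pc_tree p.1 p.2)).sum ≤ fuel := by
        have hw : pvWeight pc_tree (n' + 1) v = 1 + (ics.map (pvWeight pc_tree n')).sum := by
          rw [pvWeight]
        simp only [List.map_append, List.sum_append, List.map_cons, List.map_nil,
          List.sum_cons, List.sum_nil, List.map_map] at hsum ⊢
        rw [hw] at hsum
        have hcomp : (ics.map ((fun p => pvWeight pc_tree p.1 p.2) ∘ fun c => (n', c))).sum
            = (ics.map (pvWeight pc_tree n')).sum := by
          rfl
        rw [hcomp]
        omega
      have hIH := ih (L' ++ ics.map (fun c => (n', c))) (st ++ cs) hconds2 hsum2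
      have hmap : (ics.map (fun c => (n', c))).map Prod.snd = ics := by simp
      rw [List.map_append, hmap] at hIH
      rw [hIH]
      simp only [pvVisit, List.reverse_append, List.map_append, List.flatten_append,
        List.map_map, List.map_reverse, List.reverse_cons, List.reverse_nil,
        List.nil_append, List.map_cons, List.map_nil, List.flatten_cons, List.flatten_nil,
        List.append_nil, List.append_assoc, Function.comp_def]
      rw [← hcs, ← hics]

lemma pvInsert_insert (d : PySem.Dict Int Int) (k : Int) (a b : Int) :
    (d.insert k a).insert k b = d.insert k b := by
  apply PySem.Dict.ext
  have hc2 : (d.insert k a).contains k = true := PySem.Dict.contains_insert_self d k a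
  by_cases hc : d.contains k
  · rw [PySem.Dict.items_insert_of_contains _ b hc2,
      PySem.Dict.items_insert_of_contains _ a hc,
      PySem.Dict.items_insert_of_contains _ b hc, List.map_map]
    apply List.map_congr_left
    intro p _
    by_cases hp : p.1 = k
    · simp [Function.comp, hp]
    · simp [Function.comp, hp]
  · rw [PySem.Dict.items_insert_of_contains _ b hc2,
      PySem.Dict.items_insert_of_not_contains _ a (by simpa using hc),
      PySem.Dict.items_insert_of_not_contains _ b (by simpa using hc), List.map_append]
    congr 1
    · conv_rhs => rw [← List.map_id d.items]
      apply List.map_congr_left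
      intro p hp
      have hpk : p.1 ≠ k := by
        intro h
        apply hc
        rw [PySem.Dict.contains_iff_mem_keys]
        exact h ▸ List.mem_map.mpr ⟨p, hp, rfl⟩
      simp [hpk]
    · simp

lemma pvStep_good (pc_tree : List (Int × List Int)) (d : PySem.Dict Int Int) (curr : Int)
    (hm : pvMem pc_tree curr = true) (hg : curr ∉ pvCh pc_tree curr) :
    pvStep pc_tree d curr = d.insert curr (pvSumChD pc_tree d curr) := by
  unfold pvStep pvSumChD
  rw [hm]
  simp only [Bool.true_eq_false, if_false]
  have haux : ∀ (cs : List Int), curr ∉ cs → ∀ acc : Int,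
      cs.foldl (fun dd child => dd.insert curr (dd.getD curr 0 + dd.getD child 0))
        (d.insert curr acc)
        = d.insert curr (cs.foldl (fun a x => a + d.getD x 0) acc) := by
    intro cs
    induction cs with
    | nil => intro _ acc; simp
    | cons c cs ih =>
      intro h acc
      have hc : c ≠ curr := fun h' => h (h' ▸ List.mem_cons_self)
      simp only [List.foldl_cons]
      rw [PySem.Dict.getD_insert_self, PySem.Dict.getD_insert_of_ne _ _ _ hc,
        pvInsert_insert]
      exact ih (fun h' => h (List.mem_cons_of_mem c h')) _
  exact haux _ hg 0

lemma pvLoop2_spec (pc_tree : List (Int × List Int)) :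
    ∀ (fuel : Nat) (st : List Int) (d : PySem.Dict Int Int), st.length ≤ fuel →
      pvLoop2 pc_tree fuel st d = st.reverse.foldl (pvStep pc_tree) d := by
  intro fuel
  induction fuel with
  | zero =>
    intro st d h
    have : st = [] := List.eq_nil_of_length_eq_zero (Nat.le_zero.mp h)
    subst this
    rfl
  | succ fuel ih =>
    intro st d h
    rcases List.eq_nil_or_concat st with rfl | ⟨st', x, rfl⟩
    · rfl
    · rw [List.concat_eq_append] at h ⊢
      have hlen : st'.length ≤ fuel := by simp at h; omega
      simp only [pvLoop2, PySem.List.pop?_last]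
      rw [List.reverse_append]
      simp only [List.reverse_cons, List.reverse_nil, List.nil_append,
        List.singleton_append, List.foldl_cons]
      by_cases hx : pvMem pc_tree x = false
      · rw [if_pos hx, ih st' (d.insert x 1) hlen]
        have hstep : pvStep pc_tree d x = d.insert x 1 := by simp [pvStep, hx]
        rw [hstep]
      · rw [if_neg hx, ih st' _ hlen]
        have hstep : pvStep pc_tree d x = (pvCh pc_tree x).foldl
            (fun dd child => dd.insert x (dd.getD x 0 + dd.getD child 0))
            (d.insert x 0) := by
          simp only [pvStep, if_neg hx]
        rw [hstep]

lemma pvFill_spec (pc_tree : List (Int × List Int)) :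
    ∀ (n : Nat) (v : Int) (d : PySem.Dict Int Int),
      pvOkB pc_tree n v = true →
      pvFill pc_tree n v d = (pvVisit pc_tree n v).reverse.foldl (pvStep pc_tree) d := by
  intro n
  induction n with
  | zero => intro v d _; rfl
  | succ n ih =>
    intro v d hok
    rw [pvOkB, List.all_eq_true] at hok
    simp only [pvFill, pvVisit]
    set cs := pvCh pc_tree v with hcs
    set ics := cs.filter (fun c => pvMem pc_tree c) with hics
    rw [List.reverse_append, List.foldl_append]
    have h1 : cs.foldl (fun dd c => if pvMem pc_tree c then pvFill pc_tree n c dd else dd) d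
        = ((ics.reverse.map (pvVisit pc_tree n)).flatten).reverse.foldl (pvStep pc_tree) d := by
      rw [List.reverse_flatten]
      have hrw : ((ics.reverse.map (pvVisit pc_tree n)).map List.reverse).reverse
          = ics.map (fun c => (pvVisit pc_tree n c).reverse) := by
        simp [List.map_reverse, List.map_map, Function.comp]
      rw [hrw, List.foldl_flatten, List.foldl_map]
      rw [PySem.List.foldl_if_eq_foldl_filter (p := fun c => pvMem pc_tree c)
        (f := fun dd c => pvFill pc_tree n c dd)]
      apply PySem.List.foldl_congr_mem
      intro acc c hc
      exact ih c acc (hok c hc)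
    rw [← h1]
    apply PySem.List.foldl_congr_mem
    intro acc c hc
    have hcv : c ∈ cs := List.mem_reverse.mp hc
    by_cases hcm : pvMem pc_tree c = true
    · have hokc : pvOkB pc_tree n c = true := hok c (List.mem_filter.mpr ⟨hcv, hcm⟩)
      rw [if_pos hcm, pvStep_good pc_tree acc c hcm (pvOkB_not_self pc_tree n c hokc hcm)]
    · rw [if_neg hcm]
      have hx : pvMem pc_tree c = false := by simpa using hcm
      simp [pvStep, hx]


lemma pvMem_sub_succ (pc_tree : List (Int × List Int)) (n : Nat) (v x : Int) :
    x ∈ pvSub pc_tree (n+1) v ↔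
      ∃ c ∈ pvCh pc_tree v, (pvMem pc_tree c = true ∧ x ∈ pvSub pc_tree n c) ∨ x = c := by
  simp only [pvSub, List.mem_flatMap, List.mem_append, List.mem_singleton,
    List.mem_ite_nil_right]

lemma pvFill_get (pc_tree : List (Int × List Int)) :
    ∀ (n : Nat) (v : Int) (d : PySem.Dict Int Int),
      pvOkB pc_tree n v = true → n ≤ pc_tree.length + 1 →
      pvCorrect pc_tree d → d.keys.Nodup →
      pvCorrect pc_tree (pvFill pc_tree n v d) ∧
      (pvFill pc_tree n v d).keys.Nodup ∧
      (∀ x, (pvFill pc_tree n v d).contains x = true ↔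
        (d.contains x = true ∨ x ∈ pvSub pc_tree n v)) := by
  intro n
  induction n with
  | zero => intro v d _ _ hcor hnd; simp [pvFill, pvSub, hcor, hnd]
  | succ n ih =>
    intro v d hok hnT hcor hnd
    rw [pvOkB, List.all_eq_true] at hok
    have hokl : ∀ c ∈ pvCh pc_tree v, pvMem pc_tree c = true → pvOkB pc_tree n c = true := by
      intro c hc hm
      exact hok c (List.mem_filter.mpr ⟨hc, hm⟩)
    -- phase 1: recurse into the internal children
    have aux1 : ∀ (l : List Int),
        (∀ c ∈ l, pvMem pc_tree c = true → pvOkB pc_tree n c = true) →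
        ∀ (dd : PySem.Dict Int Int), pvCorrect pc_tree dd → dd.keys.Nodup →
        pvCorrect pc_tree (l.foldl
          (fun dd c => if pvMem pc_tree c then pvFill pc_tree n c dd else dd) dd) ∧
        (l.foldl
          (fun dd c => if pvMem pc_tree c then pvFill pc_tree n c dd else dd) dd).keys.Nodup ∧
        (∀ x, (l.foldl
          (fun dd c => if pvMem pc_tree c then pvFill pc_tree n c dd else dd) dd).contains x = true ↔
          (dd.contains x = true ∨ ∃ c ∈ l, pvMem pc_tree c = true ∧ x ∈ pvSub pc_tree n c)) := by
      intro l
      induction l with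
      | nil => intro _ dd hc hn; simp [hc, hn]
      | cons c t iht =>
        intro hl dd hc hn
        simp only [List.foldl_cons]
        by_cases hcm : pvMem pc_tree c = true
        · have hrec := ih c dd (hl c List.mem_cons_self hcm) (by omega) hc hn
          rw [if_pos hcm]
          obtain ⟨h1, h2, h3⟩ :=
            iht (fun c' hc' => hl c' (List.mem_cons_of_mem c hc')) _ hrec.1 hrec.2.1
          refine ⟨h1, h2, ?_⟩
          intro x
          rw [h3 x, hrec.2.2 x]
          constructor
          · rintro ((h | h) | h)
            · exact Or.inl h
            · exact Or.inr ⟨c, List.mem_cons_self, hcm, h⟩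
            · obtain ⟨c', hc', hx⟩ := h
              exact Or.inr ⟨c', List.mem_cons_of_mem c hc', hx⟩
          · rintro (h | ⟨c', hc', hm', hx⟩)
            · exact Or.inl (Or.inl h)
            · rcases List.mem_cons.mp hc' with rfl | hc''
              · exact Or.inl (Or.inr hx)
              · exact Or.inr ⟨c', hc'', hm', hx⟩
        · rw [if_neg hcm]
          obtain ⟨h1, h2, h3⟩ :=
            iht (fun c' hc' => hl c' (List.mem_cons_of_mem c hc')) dd hc hn
          refine ⟨h1, h2, ?_⟩
          intro x
          rw [h3 x]
          constructor
          · rintro (h | ⟨c', hc', hx⟩)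
            · exact Or.inl h
            · exact Or.inr ⟨c', List.mem_cons_of_mem c hc', hx⟩
          · rintro (h | ⟨c', hc', hm', hx⟩)
            · exact Or.inl h
            · rcases List.mem_cons.mp hc' with rfl | hc''
              · exact absurd hm' hcm
              · exact Or.inr ⟨c', hc'', hm', hx⟩
    -- phase 2: record each child
    have aux2 : ∀ (l : List Int),
        (∀ c ∈ l, pvMem pc_tree c = true → pvOkB pc_tree n c = true) →
        ∀ (dd : PySem.Dict Int Int), pvCorrect pc_tree dd → dd.keys.Nodup →
        (∀ c ∈ l, pvMem pc_tree c = true → ∀ u ∈ pvCh pc_tree c, dd.contains u = true) →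
        pvCorrect pc_tree (l.foldl
          (fun dd c => if pvMem pc_tree c then dd.insert c (pvSumChD pc_tree dd c)
            else dd.insert c 1) dd) ∧
        (l.foldl
          (fun dd c => if pvMem pc_tree c then dd.insert c (pvSumChD pc_tree dd c)
            else dd.insert c 1) dd).keys.Nodup ∧
        (∀ x, (l.foldl
          (fun dd c => if pvMem pc_tree c then dd.insert c (pvSumChD pc_tree dd c)
            else dd.insert c 1) dd).contains x = true ↔
          (dd.contains x = true ∨ x ∈ l)) := by
      intro l
      induction l with
      | nil => intro _ dd hc hn _; simp [hc, hn]
      | cons c t iht =>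
        intro hl dd hc hn hpres
        simp only [List.foldl_cons]
        have hval : (if pvMem pc_tree c then dd.insert c (pvSumChD pc_tree dd c)
            else dd.insert c 1) = dd.insert c (pvSz pc_tree (pc_tree.length + 1) c) := by
          by_cases hcm : pvMem pc_tree c = true
          · rw [if_pos hcm,
              pvSumChD_eq pc_tree dd c hc (hpres c List.mem_cons_self hcm),
              ← pvSz_internal pc_tree n c hcm (hl c List.mem_cons_self hcm) (by omega)]
          · rw [if_neg hcm,
              pvSz_leaf pc_tree c (by simpa using hcm) (pc_tree.length + 1)]
        rw [hval]
        obtain ⟨h1, h2, h3⟩ := iht (fun c' hc' => hl c' (List.mem_cons_of_mem c hc'))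
          (dd.insert c (pvSz pc_tree (pc_tree.length + 1) c))
          (pvInsert_correct pc_tree dd c hc)
          (PySem.Dict.nodup_keys_insert _ _ _ hn)
          (by
            intro c' hc' hm' u hu
            rw [PySem.Dict.contains_insert]
            rw [hpres c' (List.mem_cons_of_mem c hc') hm' u hu]
            simp)
        refine ⟨h1, h2, ?_⟩
        intro x
        rw [h3 x, PySem.Dict.contains_insert]
        simp only [Bool.or_eq_true, beq_iff_eq, List.mem_cons]
        constructor
        · rintro ((h | h) | h)
          exacts [Or.inr (Or.inl h), Or.inl h, Or.inr (Or.inr h)]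
        · rintro (h | h | h)
          exacts [Or.inl (Or.inr h), Or.inl (Or.inl h), Or.inr h]
    obtain ⟨g1, g2, g3⟩ := aux1 (pvCh pc_tree v) hokl d hcor hnd
    have hpres : ∀ c ∈ (pvCh pc_tree v).reverse, pvMem pc_tree c = true →
        ∀ u ∈ pvCh pc_tree c,
          ((pvCh pc_tree v).foldl
            (fun dd c => if pvMem pc_tree c then pvFill pc_tree n c dd else dd) d).contains u
            = true := by
      intro c hc hcm u hu
      rw [g3 u]
      refine Or.inr ⟨c, List.mem_reverse.mp hc, hcm, ?_⟩
      obtain ⟨k, rfl⟩ : ∃ k, n = k + 1 := by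
        have := hokl c (List.mem_reverse.mp hc) hcm
        cases n with
        | zero => simp [pvOkB] at this
        | succ k => exact ⟨k, rfl⟩
      rw [pvMem_sub_succ]
      exact ⟨u, hu, Or.inr rfl⟩
    obtain ⟨f1, f2, f3⟩ := aux2 (pvCh pc_tree v).reverse
      (fun c hc hm => hokl c (List.mem_reverse.mp hc) hm) _ g1 g2 hpres
    refine ⟨?_, ?_, ?_⟩
    · simpa only [pvFill] using f1
    · simpa only [pvFill] using f2
    · intro x
      have := f3 x
      simp only [pvFill]
      rw [this, g3 x, pvMem_sub_succ, List.mem_reverse]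
      constructor
      · rintro ((h | ⟨c, hc, hm, hx⟩) | h)
        · exact Or.inl h
        · exact Or.inr ⟨c, hc, Or.inl ⟨hm, hx⟩⟩
        · exact Or.inr ⟨x, h, Or.inr rfl⟩
      · rintro (h | ⟨c, hc, (⟨hm, hx⟩ | rfl)⟩)
        · exact Or.inl (Or.inl h)
        · exact Or.inl (Or.inr ⟨c, hc, hm, hx⟩)
        · exact Or.inr hc



lemma pvSorted_items_eq (dA dB : PySem.Dict Int Int)
    (hA : dA.keys.Nodup) (hB : dB.keys.Nodup)
    (h : ∀ x, dA.get? x = dB.get? x) :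
    PySem.List.sorted dA.items (fun p => p.1) false =
      PySem.List.sorted dB.items (fun p => p.1) false := by
  have hA' : (dA.items.map (fun p => p.1)).Nodup := by
    simpa only [PySem.Dict.keys] using hA
  have hB' : (dB.items.map (fun p => p.1)).Nodup := by
    simpa only [PySem.Dict.keys] using hB
  have hmem : ∀ p : Int × Int, p ∈ dA.items ↔ p ∈ dB.items := by
    intro p
    rw [← PySem.Dict.get?_eq_some_iff_mem_items dA p.1 p.2 hA,
        ← PySem.Dict.get?_eq_some_iff_mem_items dB p.1 p.2 hB, h p.1]
  have hperm : dA.items.Perm dB.items :=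
    (List.perm_ext_iff_of_nodup hA'.of_map hB'.of_map).mpr hmem
  have hpA : (PySem.List.sorted dA.items (fun p => p.1) false).Perm dA.items :=
    PySem.List.sorted_perm _ _ _
  have hle : (PySem.List.sorted dA.items (fun p => p.1) false).Pairwise
      (fun a b => a.1 ≤ b.1) := PySem.List.sorted_pairwise _ _
  have hne : (PySem.List.sorted dA.items (fun p => p.1) false).Pairwise
      (fun a b => a.1 ≠ b.1) := by
    have : ((PySem.List.sorted dA.items (fun p => p.1) false).map (fun p => p.1)).Nodup :=
      ((hpA.map (fun p => p.1)).nodup_iff).mpr hA'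
    exact List.pairwise_map.mp this
  have hlt : (PySem.List.sorted dA.items (fun p => p.1) false).Pairwise
      (fun a b => a.1 < b.1) :=
    (hle.and hne).imp (fun hab => lt_of_le_of_ne hab.1 hab.2)
  exact (PySem.List.sorted_eq_of_perm_of_pairwise_lt dB.items _ _
    (hpA.trans hperm) hlt).symm


lemma pvFillB_spec (pc_tree : List (Int × List Int)) :
    ∀ (n : Nat) (v : Int) (d : PySem.Dict Int Int),
      pvMem pc_tree v = true → pvOkB pc_tree n v = true →
      n ≤ pc_tree.length + 1 →
      pvCorrect pc_tree d → d.keys.Nodup →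
      (pvFillB pc_tree n v d).1 = pvSz pc_tree (pc_tree.length + 1) v ∧
      pvCorrect pc_tree (pvFillB pc_tree n v d).2 ∧
      (pvFillB pc_tree n v d).2.keys.Nodup ∧
      (∀ x, (pvFillB pc_tree n v d).2.contains x = true ↔
        (d.contains x = true ∨ x ∈ pvSub pc_tree n v ∨ x = v)) := by
  intro n
  induction n with
  | zero => intro v d _ hok; simp [pvOkB] at hok
  | succ n ih =>
    intro v d hv hok hnT hcor hnd
    have hokv := hok
    rw [pvOkB, List.all_eq_true] at hokv
    have aux : ∀ (l : List Int),
        (∀ c ∈ l, pvMem pc_tree c = true → pvOkB pc_tree n c = true) →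
        ∀ (s : Int) (dd : PySem.Dict Int Int), pvCorrect pc_tree dd → dd.keys.Nodup →
        (l.foldl (fun (acc : Int × PySem.Dict Int Int) child =>
            if pvMem pc_tree child then
              let rc := pvFillB pc_tree n child acc.2
              (acc.1 + rc.1, rc.2)
            else
              (acc.1 + 1, acc.2.insert child 1)) (s, dd)).1
          = s + (l.map (pvSz pc_tree (pc_tree.length + 1))).sum ∧
        pvCorrect pc_tree (l.foldl (fun (acc : Int × PySem.Dict Int Int) child =>
            if pvMem pc_tree child then
              let rc := pvFillB pc_tree n child acc.2
              (acc.1 + rc.1, rc.2)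
            else
              (acc.1 + 1, acc.2.insert child 1)) (s, dd)).2 ∧
        (l.foldl (fun (acc : Int × PySem.Dict Int Int) child =>
            if pvMem pc_tree child then
              let rc := pvFillB pc_tree n child acc.2
              (acc.1 + rc.1, rc.2)
            else
              (acc.1 + 1, acc.2.insert child 1)) (s, dd)).2.keys.Nodup ∧
        (∀ x, (l.foldl (fun (acc : Int × PySem.Dict Int Int) child =>
            if pvMem pc_tree child then
              let rc := pvFillB pc_tree n child acc.2
              (acc.1 + rc.1, rc.2)
            else
              (acc.1 + 1, acc.2.insert child 1)) (s, dd)).2.contains x = true ↔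
          (dd.contains x = true ∨
            ∃ c ∈ l, (pvMem pc_tree c = true ∧ x ∈ pvSub pc_tree n c) ∨ x = c)) := by
      intro l
      induction l with
      | nil => intro _ s dd hc hn; simp [hc, hn]
      | cons c t iht =>
        intro hl s dd hc hn
        simp only [List.foldl_cons]
        by_cases hcm : pvMem pc_tree c = true
        · rw [if_pos hcm]
          have hrc := ih c dd hcm (hl c List.mem_cons_self hcm) (by omega) hc hn
          obtain ⟨h1, h2, h3, h4⟩ :=
            iht (fun c' hc' => hl c' (List.mem_cons_of_mem c hc'))
              (s + (pvFillB pc_tree n c dd).1) (pvFillB pc_tree n c dd).2 hrc.2.1 hrc.2.2.1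
          refine ⟨?_, h2, h3, ?_⟩
          · rw [h1, hrc.1]
            simp [add_assoc]
          · intro x
            rw [h4 x, hrc.2.2.2 x]
            constructor
            · rintro ((h | h) | h)
              · exact Or.inl h
              · exact Or.inr ⟨c, List.mem_cons_self, Or.imp_left (fun hx => ⟨hcm, hx⟩) h⟩
              · obtain ⟨c', hc', hx⟩ := h
                exact Or.inr ⟨c', List.mem_cons_of_mem c hc', hx⟩
            · rintro (h | ⟨c', hc', hx⟩)
              · exact Or.inl (Or.inl h)
              · rcases List.mem_cons.mp hc' with rfl | hc''
                · rcases hx with ⟨_, hx'⟩ | hx'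
                  · exact Or.inl (Or.inr (Or.inl hx'))
                  · exact Or.inl (Or.inr (Or.inr hx'))
                · exact Or.inr ⟨c', hc'', hx⟩
        · rw [if_neg hcm]
          have hcm' : pvMem pc_tree c = false := by simpa using hcm
          have hval : (1 : Int) = pvSz pc_tree (pc_tree.length + 1) c :=
            (pvSz_leaf pc_tree c hcm' _).symm
          obtain ⟨h1, h2, h3, h4⟩ :=
            iht (fun c' hc' => hl c' (List.mem_cons_of_mem c hc')) (s + 1)
              (dd.insert c 1)
              (by rw [hval]; exact pvInsert_correct pc_tree dd c hc)
              (PySem.Dict.nodup_keys_insert _ _ _ hn)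
          refine ⟨?_, h2, h3, ?_⟩
          · rw [h1]
            simp only [List.map_cons, List.sum_cons]
            rw [← hval]
            ring
          · intro x
            rw [h4 x, PySem.Dict.contains_insert]
            simp only [Bool.or_eq_true, beq_iff_eq]
            constructor
            · rintro ((h | h) | h)
              · exact Or.inr ⟨c, List.mem_cons_self, Or.inr h⟩
              · exact Or.inl h
              · obtain ⟨c', hc', hx⟩ := h
                exact Or.inr ⟨c', List.mem_cons_of_mem c hc', hx⟩
            · rintro (h | ⟨c', hc', hx⟩)
              · exact Or.inl (Or.inr h)
              · rcases List.mem_cons.mp hc' with rfl | hc''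
                · rcases hx with ⟨hm', _⟩ | hx'
                  · exact absurd hm' hcm
                  · exact Or.inl (Or.inl hx')
                · exact Or.inr ⟨c', hc'', hx⟩
    have hokl : ∀ c ∈ pvCh pc_tree v, pvMem pc_tree c = true → pvOkB pc_tree n c = true :=
      fun c hc hm => hokv c (List.mem_filter.mpr ⟨hc, hm⟩)
    obtain ⟨h1, h2, h3, h4⟩ := aux (pvCh pc_tree v) hokl 0 d hcor hnd
    have hstep : pvFillB pc_tree (n+1) v d =
        (((pvCh pc_tree v).foldl (fun (acc : Int × PySem.Dict Int Int) child =>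
            if pvMem pc_tree child then
              let rc := pvFillB pc_tree n child acc.2
              (acc.1 + rc.1, rc.2)
            else
              (acc.1 + 1, acc.2.insert child 1)) (0, d)).1,
         ((pvCh pc_tree v).foldl (fun (acc : Int × PySem.Dict Int Int) child =>
            if pvMem pc_tree child then
              let rc := pvFillB pc_tree n child acc.2
              (acc.1 + rc.1, rc.2)
            else
              (acc.1 + 1, acc.2.insert child 1)) (0, d)).2.insert v
           (((pvCh pc_tree v).foldl (fun (acc : Int × PySem.Dict Int Int) child =>
            if pvMem pc_tree child then
              let rc := pvFillB pc_tree n child acc.2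
              (acc.1 + rc.1, rc.2)
            else
              (acc.1 + 1, acc.2.insert child 1)) (0, d)).1)) := by
      simp [pvFillB]
    rw [hstep]
    have hsz : ((pvCh pc_tree v).foldl (fun (acc : Int × PySem.Dict Int Int) child =>
        if pvMem pc_tree child then
          let rc := pvFillB pc_tree n child acc.2
          (acc.1 + rc.1, rc.2)
        else
          (acc.1 + 1, acc.2.insert child 1)) (0, d)).1
        = pvSz pc_tree (pc_tree.length + 1) v := by
      rw [h1, zero_add, ← pvSz_internal pc_tree (n+1) v hv hok hnT]
    refine ⟨hsz, ?_, PySem.Dict.nodup_keys_insert _ _ _ h3, ?_⟩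
    · rw [hsz]
      exact pvInsert_correct pc_tree _ v h2
    · intro x
      rw [PySem.Dict.contains_insert]
      simp only [Bool.or_eq_true, beq_iff_eq, h4 x, pvMem_sub_succ]
      constructor
      · rintro (h | (h | ⟨c, hc, hx⟩))
        exacts [Or.inr (Or.inr h), Or.inl h, Or.inr (Or.inl ⟨c, hc, hx⟩)]
      · rintro (h | ⟨c, hc, hx⟩ | h)
        exacts [Or.inr (Or.inl h), Or.inr (Or.inr ⟨c, hc, hx⟩), Or.inl h]

-- ===== VERDICT (by name: the statement is the Claim_ definition above) =====
theorem get_subtree_sizes_spec : Claim_equal_get_subtree_sizes := by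
  intro root pc hdom hpre
  obtain ⟨hroot, hknd, hok⟩ := hpre
  unfold Spec_get_subtree_sizes
  have hGroot : root ∉ pvCh pc root :=
    pvOkB_not_self pc (pc.length + 1) root hok hroot
  -- A's loops, reshaped into pvStep after pvFill
  have h1 : pvLoop1 pc (pvWeight pc (pc.length + 1) root) [root] [root]
      = [root] ++ pvVisit pc (pc.length + 1) root := by
    have := pvLoop1_spec pc (pvWeight pc (pc.length + 1) root)
      [(pc.length + 1, root)] [root]
      (by
        intro p hp
        simp only [List.mem_singleton] at hp
        subst hp
        exact ⟨hok, hroot⟩)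
      (by simp)
    simpa using this
  have h2 : (pvLoop2 pc ([root] ++ pvVisit pc (pc.length + 1) root).length
        ([root] ++ pvVisit pc (pc.length + 1) root) PySem.Dict.empty)
      = pvStep pc (pvFill pc (pc.length + 1) root PySem.Dict.empty) root := by
    rw [pvLoop2_spec pc _ _ _ (le_refl _), List.reverse_append]
    simp only [List.reverse_cons, List.reverse_nil, List.nil_append, List.foldl_append,
      List.foldl_cons, List.foldl_nil]
    rw [pvFill_spec pc (pc.length + 1) root PySem.Dict.empty hok]
  -- the two dicts
  have hcorE : pvCorrect pc PySem.Dict.empty := by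
    intro x y hxy
    rw [PySem.Dict.get?_empty] at hxy
    cases hxy
  have hndE : (PySem.Dict.empty : PySem.Dict Int Int).keys.Nodup := by
    rw [PySem.Dict.keys_empty]
    exact List.nodup_nil
  obtain ⟨fc, fn, fm⟩ := pvFill_get pc (pc.length + 1) root PySem.Dict.empty hok
    (le_refl _) hcorE hndE
  obtain ⟨b1, bc, bn, bm⟩ := pvFillB_spec pc (pc.length + 1) root PySem.Dict.empty
    hroot hok (le_refl _) hcorE hndE
  -- the value A records for root
  have hchsub : ∀ u ∈ pvCh pc root, u ∈ pvSub pc (pc.length + 1) root := by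
    intro u hu
    rw [pvMem_sub_succ]
    exact ⟨u, hu, Or.inr rfl⟩
  have hrootval : pvSumChD pc (pvFill pc (pc.length + 1) root PySem.Dict.empty) root
      = pvSz pc (pc.length + 1) root := by
    rw [pvSumChD_eq pc _ root fc (by
      intro u hu
      rw [fm u]
      exact Or.inr (hchsub u hu))]
    rw [← pvSz_internal pc (pc.length + 1) root hroot hok (le_refl _)]
  have hstepA : pvStep pc (pvFill pc (pc.length + 1) root PySem.Dict.empty) root
      = (pvFill pc (pc.length + 1) root PySem.Dict.empty).insert root
          (pvSz pc (pc.length + 1) root) := by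
    rw [pvStep_good pc _ root hroot hGroot, hrootval]
  -- the two dicts agree as key→value maps
  have hget : ∀ x,
      ((pvFill pc (pc.length + 1) root PySem.Dict.empty).insert root
        (pvSz pc (pc.length + 1) root)).get? x
      = (pvFillB pc (pc.length + 1) root PySem.Dict.empty).2.get? x := by
    intro x
    have hcA : ((pvFill pc (pc.length + 1) root PySem.Dict.empty).insert root
        (pvSz pc (pc.length + 1) root)).contains x = true ↔
        (x = root ∨ x ∈ pvSub pc (pc.length + 1) root) := by
      rw [PySem.Dict.contains_insert]
      simp only [Bool.or_eq_true, beq_iff_eq, fm x, PySem.Dict.contains_empty,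
        Bool.false_eq_true, false_or]
    have hcB : (pvFillB pc (pc.length + 1) root PySem.Dict.empty).2.contains x = true ↔
        (x = root ∨ x ∈ pvSub pc (pc.length + 1) root) := by
      rw [bm x]
      simp only [PySem.Dict.contains_empty, Bool.false_eq_true, false_or]
      exact Or.comm
    have hcorA : pvCorrect pc ((pvFill pc (pc.length + 1) root PySem.Dict.empty).insert root
        (pvSz pc (pc.length + 1) root)) := pvInsert_correct pc _ root fc
    by_cases hx : ((pvFill pc (pc.length + 1) root PySem.Dict.empty).insert root
        (pvSz pc (pc.length + 1) root)).contains x = true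
    · have hxB := hcB.mpr (hcA.mp hx)
      rw [PySem.Dict.contains_eq_isSome_get?] at hx hxB
      obtain ⟨yA, hyA⟩ := Option.isSome_iff_exists.mp hx
      obtain ⟨yB, hyB⟩ := Option.isSome_iff_exists.mp hxB
      rw [hyA, hyB, hcorA x yA hyA, bc x yB hyB]
    · have hx' : ((pvFill pc (pc.length + 1) root PySem.Dict.empty).insert root
          (pvSz pc (pc.length + 1) root)).contains x = false := by
        simpa using hx
      have hxB : (pvFillB pc (pc.length + 1) root PySem.Dict.empty).2.contains x = false := by
        by_cases h : (pvFillB pc (pc.length + 1) root PySem.Dict.empty).2.contains x = true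
        · exact absurd (hcA.mpr (hcB.mp h)) hx
        · simpa using h
      rw [(PySem.Dict.get?_eq_none_iff_contains _ _).mpr hx',
          (PySem.Dict.get?_eq_none_iff_contains _ _).mpr hxB]
  -- assemble
  simp only [get_subtree_sizes, get_subtree_sizes_alt]
  rw [h1, h2, hstepA]
  exact pvSorted_items_eq _ _
    (PySem.Dict.nodup_keys_insert _ _ _ fn) bn hget
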